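-- pv_equiv track=rewrite | github.com/Anam-Batool-12/Python_Ethical_Hacking | zigzag.py | diagonal_zigzag_encrypt
-- ===== SOURCE A (Python) =====
-- def diagonal_zigzag_encrypt(text, cols):
--     text = text.replace(" ", "")
--     rows = -(-len(text)//cols)
--     text = text.ljust(rows * cols, "X")
--
--     matrix = [list(text[i*cols:(i+1)*cols]) for i in range(rows)]
--     cipher = ""
--
--     r = 0
--     c = 0
--     direction = 1
--
--     for _ in range(rows * cols):
--         cipher += matrix[r][c]
--
--         if direction == 1:
--             if r == rows - 1:
--                 c += 1
--                 direction = -1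
--             else:
--                 r += 1
--                 c += 1
--         else:
--             if r == 0:
--                 c += 1
--                 direction = 1
--             else:
--                 r -= 1
--                 c += 1
--
--         if c >= cols:
--             c = c % cols
--
--     return cipher
-- ===== SOURCE B (Python) =====
-- def diagonal_zigzag_encrypt(text, cols):
--     text = text.replace(" ", "")
--     rows = -(-len(text) // cols)
--     text = text.ljust(rows * cols, "X")
--
--     out = []
--     for k in range(rows * cols):
--         p = k % (2 * rows)
--         r = p if p < rows else 2 * rows - 1 - p
--         out.append(text[r * cols + k % cols])
--     return "".join(out)
-- ===== Notes on version B (the rewrite author's own statement) =====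
-- stated objective: simpler
-- what changed: Drops the matrix and the r/c/direction cursor state machine: the k-th output character's source position is computed in closed form (triangle wave p=k%(2*rows), r=p if p<rows else 2*rows-1-p, index r*cols+k%cols) and characters are collected with a single join.
import Mathlib
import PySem

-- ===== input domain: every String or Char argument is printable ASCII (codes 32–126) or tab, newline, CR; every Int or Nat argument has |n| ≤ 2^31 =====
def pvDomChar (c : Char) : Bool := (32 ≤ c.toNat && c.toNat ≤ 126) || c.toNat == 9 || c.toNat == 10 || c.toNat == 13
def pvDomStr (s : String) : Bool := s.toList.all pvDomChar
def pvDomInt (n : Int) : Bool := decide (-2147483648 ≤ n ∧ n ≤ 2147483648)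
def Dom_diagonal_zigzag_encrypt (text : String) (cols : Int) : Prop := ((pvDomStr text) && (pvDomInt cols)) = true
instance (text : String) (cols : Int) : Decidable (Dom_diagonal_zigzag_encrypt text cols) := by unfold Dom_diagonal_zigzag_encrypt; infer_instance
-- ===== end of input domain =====

-- B replaces A's matrix and direction/cursor state machine by a closed-form index map
-- (triangle wave r(k), column k % cols); objective: simpler.

-- ===== PORT A =====
def diagonal_zigzag_encrypt (text : String) (cols : Int) : String :=
  -- text = text.replace(" ", "")
  let text1 := PySem.Str.replace text " " ""
  -- rows = -(-len(text)//cols)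
  let rows : Int := -(PySem.Int.floordiv (-(PySem.Str.len text1)) cols)
  -- text = text.ljust(rows*cols, "X")  -- ljust ported by hand (no PySem primitive): pad with 'X' up to the width; exact
  let padded : List Char := text1.toList ++ List.replicate (rows * cols - PySem.Str.len text1).toNat 'X'
  -- matrix = [list(text[i*cols:(i+1)*cols]) for i in range(rows)]
  let matrix : List (List Char) :=
    (PySem.List.pyRange 0 rows 1).map
      (fun i => PySem.List.slice padded (some (i * cols)) (some ((i + 1) * cols)))
  -- the for-loop; state (r, c, direction, cipher); matrix[r][c] is in range on every admitted input
  let st :=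
    (PySem.List.pyRange 0 (rows * cols) 1).foldl
      (fun (s : Int × Int × Int × List Char) _ =>
        let cipher := s.2.2.2 ++ [PySem.List.pyGetD (PySem.List.pyGetD matrix s.1 []) s.2.1 '?']
        let rcd : Int × Int × Int :=
          if s.2.2.1 = 1 then
            if s.1 = rows - 1 then (s.1, s.2.1 + 1, -1)
            else (s.1 + 1, s.2.1 + 1, s.2.2.1)
          else
            if s.1 = 0 then (s.1, s.2.1 + 1, 1)
            else (s.1 - 1, s.2.1 + 1, s.2.2.1)
        let c := if cols ≤ rcd.2.1 then PySem.Int.mod rcd.2.1 cols else rcd.2.1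
        (rcd.1, c, rcd.2.2, cipher))
      (0, 0, 1, ([] : List Char))
  String.ofList st.2.2.2

-- ===== PORT B =====
def diagonal_zigzag_encrypt_alt (text : String) (cols : Int) : String :=
  let text1 := PySem.Str.replace text " " ""
  let rows : Int := -(PySem.Int.floordiv (-(PySem.Str.len text1)) cols)
  -- ljust ported by hand (no PySem primitive): pad with 'X' up to the width; exact
  let padded : List Char := text1.toList ++ List.replicate (rows * cols - PySem.Str.len text1).toNat 'X'
  let out : List Char :=
    (PySem.List.pyRange 0 (rows * cols) 1).map (fun k =>
      let p := PySem.Int.mod k (2 * rows)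
      let r := if p < rows then p else 2 * rows - 1 - p
      PySem.List.pyGetD padded (r * cols + PySem.Int.mod k cols) '?')
  String.ofList out

-- ===== PRECONDITION & SPEC =====
-- Pre_ excludes exactly the inputs on which A raises: cols = 0 (ZeroDivisionError) and
-- cols < 0 with at least -cols non-space characters (rows becomes negative and matrix[0] is an IndexError);
-- on every other input A returns normally.
def Pre_diagonal_zigzag_encrypt (text : String) (cols : Int) : Prop :=
  1 ≤ cols ∨ (cols < 0 ∧ PySem.Str.len (PySem.Str.replace text " " "") < -cols)
instance (text : String) (cols : Int) : Decidable (Pre_diagonal_zigzag_encrypt text cols) := by unfold Pre_diagonal_zigzag_encrypt; infer_instance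
def pvWitness_diagonal_zigzag_encrypt : String × Int := ("WE ARE DISCOVERED", 4)

def Spec_diagonal_zigzag_encrypt (text : String) (cols : Int) (out : String) : Prop := out = diagonal_zigzag_encrypt_alt text cols
instance (text : String) (cols : Int) (out : String) : Decidable (Spec_diagonal_zigzag_encrypt text cols out) := by unfold Spec_diagonal_zigzag_encrypt; infer_instance

-- ===== CLAIM (what is proved, stated in full; the proofs are below) =====
def Claim_equal_diagonal_zigzag_encrypt : Prop := ∀ (text : String) (cols : Int), Dom_diagonal_zigzag_encrypt text cols → Pre_diagonal_zigzag_encrypt text cols → Spec_diagonal_zigzag_encrypt text cols (diagonal_zigzag_encrypt text cols)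

-- ===== LEMMAS AND PROOFS =====

-- r(k) of the triangle wave and the direction flag, as functions of the step counter
def zzTri (rows k : Int) : Int :=
  if k % (2 * rows) < rows then k % (2 * rows) else 2 * rows - 1 - k % (2 * rows)

def zzDir (rows k : Int) : Int := if k % (2 * rows) < rows then 1 else -1

-- A's loop body, with the emission function abstracted
def zzStep (rows cols : Int) (E : Int → Int → Char) (s : Int × Int × Int × List Char) (_ : Int) :
    Int × Int × Int × List Char :=
  let cipher := s.2.2.2 ++ [E s.1 s.2.1]
  let rcd : Int × Int × Int :=
    if s.2.2.1 = 1 then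
      if s.1 = rows - 1 then (s.1, s.2.1 + 1, -1)
      else (s.1 + 1, s.2.1 + 1, s.2.2.1)
    else
      if s.1 = 0 then (s.1, s.2.1 + 1, 1)
      else (s.1 - 1, s.2.1 + 1, s.2.2.1)
  let c := if cols ≤ rcd.2.1 then PySem.Int.mod rcd.2.1 cols else rcd.2.1
  (rcd.1, c, rcd.2.2, cipher)

lemma succ_emod (b m : Int) (hb : 0 < b) :
    (m + 1) % b = if m % b = b - 1 then 0 else m % b + 1 := by
  have h0 : 0 ≤ m % b := Int.emod_nonneg m (by omega)
  have h1 : m % b < b := Int.emod_lt_of_pos m hb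
  have key : (m + 1) % b = (m % b + 1) % b := by
    conv_lhs => rw [← Int.mul_ediv_add_emod m b]
    rw [show b * (m / b) + m % b + 1 = m % b + 1 + b * (m / b) by ring,
        Int.add_mul_emod_self_left]
  rw [key]
  by_cases h : m % b = b - 1
  · rw [if_pos h, show m % b + 1 = b by omega, Int.emod_self]
  · rw [if_neg h, Int.emod_eq_of_lt (by omega) (by omega)]

lemma zz_step_eq (rows cols : Int) (E : Int → Int → Char) (hr : 1 ≤ rows) (hc : 1 ≤ cols)
    (m : Int) (hm : 0 ≤ m) (acc : List Char) (x : Int) :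
    zzStep rows cols E (zzTri rows m, m % cols, zzDir rows m, acc) x
      = (zzTri rows (m + 1), (m + 1) % cols, zzDir rows (m + 1),
         acc ++ [E (zzTri rows m) (m % cols)]) := by
  have h2r : (0:Int) < 2 * rows := by omega
  have hp0 : 0 ≤ m % (2 * rows) := Int.emod_nonneg m (by omega)
  have hp1 : m % (2 * rows) < 2 * rows := Int.emod_lt_of_pos m h2r
  have hq0 : 0 ≤ m % cols := Int.emod_nonneg m (by omega)
  have hq1 : m % cols < cols := Int.emod_lt_of_pos m (by omega)
  have hps := succ_emod (2 * rows) m h2r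
  have hqs := succ_emod cols m (by omega)
  have hmc : PySem.Int.mod cols cols = 0 := by
    rw [PySem.Int.mod_eq_emod_of_pos (by omega : (0:Int) < cols), Int.emod_self]
  simp only [zzStep, zzTri, zzDir]
  rw [hps]
  by_cases h1 : m % (2 * rows) < rows
  · simp only [if_pos h1]
    simp only [if_true]
    by_cases h2 : m % (2 * rows) = rows - 1
    · rw [if_pos h2]
      try dsimp only
      by_cases hQ : m % cols = cols - 1
      · rw [if_pos hQ] at hqs
        rw [hqs, if_pos (show cols <= m % cols + 1 by omega), show m % cols + 1 = cols by omega, hmc]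
        simp only [Prod.mk.injEq]
        and_intros <;> first | rfl | trivial | (split_ifs <;> omega) | omega
      · rw [if_neg hQ] at hqs
        rw [hqs, if_neg (show Not (cols <= m % cols + 1) by omega)]
        simp only [Prod.mk.injEq]
        and_intros <;> first | rfl | trivial | (split_ifs <;> omega) | omega
    · rw [if_neg h2]
      try dsimp only
      by_cases hQ : m % cols = cols - 1
      · rw [if_pos hQ] at hqs
        rw [hqs, if_pos (show cols <= m % cols + 1 by omega), show m % cols + 1 = cols by omega, hmc]
        simp only [Prod.mk.injEq]
        and_intros <;> first | rfl | trivial | (split_ifs <;> omega) | omega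
      · rw [if_neg hQ] at hqs
        rw [hqs, if_neg (show Not (cols <= m % cols + 1) by omega)]
        simp only [Prod.mk.injEq]
        and_intros <;> first | rfl | trivial | (split_ifs <;> omega) | omega
  · simp only [if_neg h1]
    rw [if_neg (show Not ((-1:Int) = 1) by decide)]
    by_cases h3 : 2 * rows - 1 - m % (2 * rows) = 0
    · rw [if_pos h3]
      try dsimp only
      by_cases hQ : m % cols = cols - 1
      · rw [if_pos hQ] at hqs
        rw [hqs, if_pos (show cols <= m % cols + 1 by omega), show m % cols + 1 = cols by omega, hmc]
        simp only [Prod.mk.injEq]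
        and_intros <;> first | rfl | trivial | (split_ifs <;> omega) | omega
      · rw [if_neg hQ] at hqs
        rw [hqs, if_neg (show Not (cols <= m % cols + 1) by omega)]
        simp only [Prod.mk.injEq]
        and_intros <;> first | rfl | trivial | (split_ifs <;> omega) | omega
    · rw [if_neg h3]
      try dsimp only
      by_cases hQ : m % cols = cols - 1
      · rw [if_pos hQ] at hqs
        rw [hqs, if_pos (show cols <= m % cols + 1 by omega), show m % cols + 1 = cols by omega, hmc]
        simp only [Prod.mk.injEq]
        and_intros <;> first | rfl | trivial | (split_ifs <;> omega) | omega
      · rw [if_neg hQ] at hqs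
        rw [hqs, if_neg (show Not (cols <= m % cols + 1) by omega)]
        simp only [Prod.mk.injEq]
        and_intros <;> first | rfl | trivial | (split_ifs <;> omega) | omega

lemma zz_loop (rows cols : Int) (E : Int → Int → Char) (hr : 1 ≤ rows) (hc : 1 ≤ cols)
    (N : Int) (fuel : Nat) :
    ∀ (m : Int), 0 ≤ m → N ≤ m + fuel → ∀ (acc : List Char),
    ((PySem.List.pyRange m N 1).foldl (zzStep rows cols E) (zzTri rows m, m % cols, zzDir rows m, acc)).2.2.2
      = acc ++ (PySem.List.pyRange m N 1).map (fun k => E (zzTri rows k) (k % cols)) := by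
  induction fuel with
  | zero =>
    intro m hm hN acc
    rw [PySem.List.pyRange_one_eq_nil (by omega)]
    simp
  | succ fuel ih =>
    intro m hm hN acc
    by_cases hmN : m < N
    · rw [PySem.List.pyRange_one_cons hmN]
      simp only [List.foldl_cons, List.map_cons]
      rw [zz_step_eq rows cols E hr hc m hm acc m,
          ih (m + 1) (by omega) (by omega) (acc ++ [E (zzTri rows m) (m % cols)])]
      simp
    · rw [PySem.List.pyRange_one_eq_nil (by omega)]
      simp

lemma zz_matrix (padded : List Char) (rows cols r c : Int) (hr0 : 0 ≤ r) (hr1 : r < rows)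
    (hc0 : 0 ≤ c) (hc1 : c < cols)
    (hlen : (padded.length : Int) = rows * cols) :
    PySem.List.pyGetD
      (PySem.List.pyGetD
        ((PySem.List.pyRange 0 rows 1).map
          (fun i => PySem.List.slice padded (some (i * cols)) (some ((i + 1) * cols)))) r [])
      c '?'
      = PySem.List.pyGetD padded (r * cols + c) '?' := by
  have hcp : (0:Int) < cols := by omega
  have hrc0 : (0:Int) ≤ r * cols := mul_nonneg hr0 (by omega)
  have hrc1 : (0:Int) ≤ (r + 1) * cols := mul_nonneg (by omega) (by omega)
  have hmul : (r + 1) * cols ≤ rows * cols :=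
    mul_le_mul_of_nonneg_right (by omega) (by omega)
  have hexp : (r + 1) * cols = r * cols + cols := by ring
  rw [PySem.List.pyGetD_map_pyRange_of_nonneg _ rows r [] hr0 hr1]
  rw [PySem.List.slice_toNat padded hrc0 hrc1]
  have hlt : c.toNat < (List.take (((r + 1) * cols).toNat - (r * cols).toNat) (List.drop (r * cols).toNat padded)).length := by
    simp only [List.length_take, List.length_drop]
    omega
  rw [PySem.List.pyGetD_eq_getElem _ '?' hc0 (by exact_mod_cast (by push_cast; omega : (c : Int) < ((List.take (((r + 1) * cols).toNat - (r * cols).toNat) (List.drop (r * cols).toNat padded)).length : Int)))]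
  rw [PySem.List.pyGetD_eq_getElem padded '?' (by omega) (by omega)]
  rw [List.getElem_take, List.getElem_drop]
  congr 1
  omega

lemma zz_tri_bounds (rows k : Int) (hr : 1 ≤ rows) :
    0 ≤ zzTri rows k ∧ zzTri rows k < rows := by
  have h2r : (0:Int) < 2 * rows := by omega
  have hp0 : 0 ≤ k % (2 * rows) := Int.emod_nonneg k (by omega)
  have hp1 : k % (2 * rows) < 2 * rows := Int.emod_lt_of_pos k h2r
  unfold zzTri
  split_ifs <;> omega

lemma zz_AB (rows cols : Int) (padded : List Char) (hr : 1 ≤ rows) (hc : 1 ≤ cols)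
    (hlen : (padded.length : Int) = rows * cols) :
    ((PySem.List.pyRange 0 (rows * cols) 1).foldl
        (fun (s : Int × Int × Int × List Char) _ =>
          let cipher := s.2.2.2 ++ [PySem.List.pyGetD (PySem.List.pyGetD
            ((PySem.List.pyRange 0 rows 1).map
              (fun i => PySem.List.slice padded (some (i * cols)) (some ((i + 1) * cols)))) s.1 []) s.2.1 '?']
          let rcd : Int × Int × Int :=
            if s.2.2.1 = 1 then
              if s.1 = rows - 1 then (s.1, s.2.1 + 1, -1)
              else (s.1 + 1, s.2.1 + 1, s.2.2.1)
            else
              if s.1 = 0 then (s.1, s.2.1 + 1, 1)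
              else (s.1 - 1, s.2.1 + 1, s.2.2.1)
          let c := if cols ≤ rcd.2.1 then PySem.Int.mod rcd.2.1 cols else rcd.2.1
          (rcd.1, c, rcd.2.2, cipher))
        (0, 0, 1, ([] : List Char))).2.2.2
      = (PySem.List.pyRange 0 (rows * cols) 1).map (fun k =>
          let p := PySem.Int.mod k (2 * rows)
          let r := if p < rows then p else 2 * rows - 1 - p
          PySem.List.pyGetD padded (r * cols + PySem.Int.mod k cols) '?') := by
  have hN0 : (0:Int) ≤ rows * cols := by
    have := padded.length
    omega
  change ((PySem.List.pyRange 0 (rows * cols) 1).foldl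
      (zzStep rows cols (fun a b => PySem.List.pyGetD (PySem.List.pyGetD
        ((PySem.List.pyRange 0 rows 1).map
          (fun i => PySem.List.slice padded (some (i * cols)) (some ((i + 1) * cols)))) a []) b '?'))
      (0, 0, 1, ([] : List Char))).2.2.2 = _
  have hinit : ((0:Int), (0:Int), (1:Int), ([] : List Char))
      = (zzTri rows 0, (0:Int) % cols, zzDir rows 0, ([] : List Char)) := by
    simp [zzTri, zzDir, Int.zero_emod, show (0:Int) < rows by omega]
  rw [hinit, zz_loop rows cols _ hr hc (rows * cols) (rows * cols).toNat 0 le_rfl (by omega) []]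
  rw [List.nil_append]
  apply List.map_congr_left
  intro k hk
  rw [PySem.List.mem_pyRange_one] at hk
  have hm2 : PySem.Int.mod k (2 * rows) = k % (2 * rows) :=
    PySem.Int.mod_eq_emod_of_pos (by omega)
  have hmk : PySem.Int.mod k cols = k % cols := PySem.Int.mod_eq_emod_of_pos (by omega)
  dsimp only
  rw [hm2, hmk]
  have htb := zz_tri_bounds rows k hr
  have hq0 : 0 ≤ k % cols := Int.emod_nonneg k (by omega)
  have hq1 : k % cols < cols := Int.emod_lt_of_pos k (by omega)
  rw [show (if k % (2 * rows) < rows then k % (2 * rows) else 2 * rows - 1 - k % (2 * rows)) = zzTri rows k from rfl]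
  exact zz_matrix padded rows cols (zzTri rows k) (k % cols) htb.1 htb.2 hq0 hq1 hlen

lemma zz_core (cols : Int) (cs : List Char)
    (hpre : 1 ≤ cols ∨ (cols < 0 ∧ ((cs.length : Nat) : Int) < -cols)) :
    String.ofList
      ((PySem.List.pyRange 0 (-(PySem.Int.floordiv (-((cs.length : Nat) : Int)) cols) * cols) 1).foldl
        (fun (s : Int × Int × Int × List Char) _ =>
          let cipher := s.2.2.2 ++ [PySem.List.pyGetD (PySem.List.pyGetD
            ((PySem.List.pyRange 0 (-(PySem.Int.floordiv (-((cs.length : Nat) : Int)) cols)) 1).map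
              (fun i => PySem.List.slice
                (cs ++ List.replicate (-(PySem.Int.floordiv (-((cs.length : Nat) : Int)) cols) * cols - ((cs.length : Nat) : Int)).toNat 'X')
                (some (i * cols)) (some ((i + 1) * cols)))) s.1 []) s.2.1 '?']
          let rcd : Int × Int × Int :=
            if s.2.2.1 = 1 then
              if s.1 = -(PySem.Int.floordiv (-((cs.length : Nat) : Int)) cols) - 1 then (s.1, s.2.1 + 1, -1)
              else (s.1 + 1, s.2.1 + 1, s.2.2.1)
            else
              if s.1 = 0 then (s.1, s.2.1 + 1, 1)
              else (s.1 - 1, s.2.1 + 1, s.2.2.1)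
          let c := if cols ≤ rcd.2.1 then PySem.Int.mod rcd.2.1 cols else rcd.2.1
          (rcd.1, c, rcd.2.2, cipher))
        (0, 0, 1, ([] : List Char))).2.2.2
      = String.ofList
        ((PySem.List.pyRange 0 (-(PySem.Int.floordiv (-((cs.length : Nat) : Int)) cols) * cols) 1).map (fun k =>
          let p := PySem.Int.mod k (2 * -(PySem.Int.floordiv (-((cs.length : Nat) : Int)) cols))
          let r := if p < -(PySem.Int.floordiv (-((cs.length : Nat) : Int)) cols) then p
                   else 2 * -(PySem.Int.floordiv (-((cs.length : Nat) : Int)) cols) - 1 - p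
          PySem.List.pyGetD
            (cs ++ List.replicate (-(PySem.Int.floordiv (-((cs.length : Nat) : Int)) cols) * cols - ((cs.length : Nat) : Int)).toNat 'X')
            (r * cols + PySem.Int.mod k cols) '?')) := by
  rcases hpre with hc | ⟨hneg, hlen⟩
  · by_cases hL : cs.length = 0
    · have h0 : -(PySem.Int.floordiv (-((cs.length : Nat) : Int)) cols) = 0 := by
        simp [hL, PySem.Int.floordiv]
      rw [h0]
      simp [PySem.List.pyRange_one_eq_nil (le_refl (0:Int))]
    · set R := -(PySem.Int.floordiv (-((cs.length : Nat) : Int)) cols) with hRdef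
      have hR := (PySem.Int.neg_floordiv_neg_eq_iff_of_pos
        (show (0:Int) < cols by omega)).mp hRdef.symm
      have hR1 : 1 ≤ R := by
        by_contra hcon
        have hRle : R ≤ 0 := by omega
        have hmul := mul_le_mul_of_nonneg_right hRle (show (0:Int) ≤ cols by omega)
        rw [zero_mul] at hmul
        have h2 := hR.2
        omega
      have hplen : ((cs ++ List.replicate (R * cols - ((cs.length : Nat) : Int)).toNat 'X').length : Int)
          = R * cols := by
        have h2 := hR.2
        simp only [List.length_append, List.length_replicate]
        omega
      rw [zz_AB R cols _ hR1 hc hplen]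
  · have h1 : PySem.Int.floordiv (-((cs.length : Nat) : Int)) cols = 0 := by
      have h2 : PySem.Int.floordiv (-((cs.length : Nat) : Int)) cols
          = PySem.Int.floordiv ((cs.length : Nat) : Int) (-cols) := by
        have h3 := PySem.Int.floordiv_neg_neg ((cs.length : Nat) : Int) (-cols)
        simpa using h3
      rw [h2, PySem.Int.floordiv_eq_ediv_of_pos (by omega)]
      exact Int.ediv_eq_zero_of_lt (by omega) (by omega)
    rw [h1]
    simp [PySem.List.pyRange_one_eq_nil (le_refl (0:Int))]

-- ===== VERDICT (by name: the statement is the Claim_ definition above) =====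
set_option maxHeartbeats 2000000 in
theorem diagonal_zigzag_encrypt_spec : Claim_equal_diagonal_zigzag_encrypt := by
  unfold Claim_equal_diagonal_zigzag_encrypt
  intro text cols hdom hpre
  unfold Pre_diagonal_zigzag_encrypt at hpre
  unfold Spec_diagonal_zigzag_encrypt
  rw [PySem.Str.len_eq] at hpre
  simp only [diagonal_zigzag_encrypt, diagonal_zigzag_encrypt_alt, PySem.Str.len_eq]
  exact zz_core cols (PySem.Str.replace text " " "").toList hpre
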